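-- pv_equiv track=rewrite | github.com/nitin22032002/leetcode_question | Reversing the equation - GFG/reversing-the-equation.py | reverseEqn
-- ===== SOURCE A (Python) =====
-- def reverseEqn(s):
--     ans=[]
--     i=len(s)-1
--     while(i>=0):
--         val=""
--         while(i>=0 and s[i]>='0' and s[i]<='9'):
--             val+=s[i]
--             i-=1
--         if(val!=""):
--             ans.append(val[::-1])
--         if(i>=0):
--             ans.append(s[i])
--             i-=1
--     return "".join(ans)
-- ===== SOURCE B (Python) =====
-- def reverseEqn(s):
--     # Forward tokenization (numbers kept whole, every other char its own
--     # token), then join the token list reversed.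
--     tokens = []
--     i, n = 0, len(s)
--     while i < n:
--         c = s[i]
--         i += 1
--         if c.isdigit():
--             num = c
--             while i < n and s[i].isdigit():
--                 num += s[i]
--                 i += 1
--             tokens.append(num)
--         else:
--             tokens.append(c)
--     return ''.join(reversed(tokens))
-- ===== Notes on version B (the rewrite author's own statement) =====
-- stated objective: idiomatic
-- what changed: Replaces A's right-to-left scan that rebuilds each number inline (reversing every digit run it collected) with a forward tokenization pass into a token list followed by a reversed join.
import Mathlib
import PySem

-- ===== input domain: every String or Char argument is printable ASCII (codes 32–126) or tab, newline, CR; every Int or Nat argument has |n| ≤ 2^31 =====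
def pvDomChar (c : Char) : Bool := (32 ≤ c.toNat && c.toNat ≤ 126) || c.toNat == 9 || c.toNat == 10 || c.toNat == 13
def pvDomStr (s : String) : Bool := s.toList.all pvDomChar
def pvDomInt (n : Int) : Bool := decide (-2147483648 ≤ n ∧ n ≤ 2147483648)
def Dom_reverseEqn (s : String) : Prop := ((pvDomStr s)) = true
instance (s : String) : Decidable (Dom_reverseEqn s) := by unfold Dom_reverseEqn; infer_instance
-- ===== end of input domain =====

-- B replaces A's right-to-left scan that rebuilds numbers inline with a forward
-- tokenization pass followed by a reversed join (idiomatic; same cost).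

-- ===== PORT A =====
-- inner while: collect digit chars walking leftwards (the list is s reversed);
-- returns (val, remaining reversed chars)
def aInner : List Char → List Char → List Char × List Char
  | val, [] => (val, [])
  | val, c :: rest =>
    if '0' ≤ c ∧ c ≤ '9' then aInner (val ++ [c]) rest else (val, c :: rest)

theorem aInner_snd_le (val l : List Char) : (aInner val l).2.length ≤ l.length := by
  induction l generalizing val with
  | nil => simp [aInner]
  | cons c rest ih =>
    simp only [aInner]
    split
    · exact le_trans (ih _) (Nat.le_succ _)
    · simp

-- outer while over the reversed character list, accumulating ans
def aOuter : List Char → List (List Char) → List (List Char)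
  | [], ans => ans
  | c0 :: rcs0, ans =>
    match hp : aInner [] (c0 :: rcs0) with
    | (val, []) => if val ≠ [] then ans ++ [val.reverse] else ans
    | (val, c :: rest) =>
      aOuter rest ((if val ≠ [] then ans ++ [val.reverse] else ans) ++ [[c]])
  termination_by l _ => l.length
  decreasing_by
    have h := aInner_snd_le [] (c0 :: rcs0)
    rw [hp] at h
    simp at h ⊢
    omega

def reverseEqn (s : String) : String :=
  String.mk (aOuter s.toList.reverse []).flatten

-- ===== PORT B =====
-- inner while: extend the current number token with following digits
def bNum : List Char → List Char → List Char × List Char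
  | num, [] => (num, [])
  | num, c :: rest =>
    if PySem.Chars.isdigit c then bNum (num ++ [c]) rest else (num, c :: rest)

theorem bNum_snd_le (num l : List Char) : (bNum num l).2.length ≤ l.length := by
  induction l generalizing num with
  | nil => simp [bNum]
  | cons c rest ih =>
    simp only [bNum]
    split
    · exact le_trans (ih _) (Nat.le_succ _)
    · simp

-- outer while: one token per step, numbers taken whole
def bTokens : List Char → List (List Char)
  | [] => []
  | c :: rest =>
    if PySem.Chars.isdigit c then
      let p := bNum [c] rest
      p.1 :: bTokens p.2
    else
      [c] :: bTokens rest
  termination_by l => l.length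
  decreasing_by
    · have h := bNum_snd_le [c] rest
      simp
      omega
    · simp

def reverseEqn_alt (s : String) : String :=
  String.mk (bTokens s.toList).reverse.flatten

-- ===== PRECONDITION & SPEC =====
def Spec_reverseEqn (s : String) (out : String) : Prop := out = reverseEqn_alt s
instance (s : String) (out : String) : Decidable (Spec_reverseEqn s out) := by unfold Spec_reverseEqn; infer_instance

-- ===== CLAIM (what is proved, stated in full; the proofs are below) =====
def Claim_equal_reverseEqn : Prop := ∀ (s : String), Dom_reverseEqn s → Spec_reverseEqn s (reverseEqn s)

-- ===== LEMMAS AND PROOFS =====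

theorem dig_iff (c : Char) : ('0' ≤ c ∧ c ≤ '9') ↔ PySem.Chars.isdigit c = true := by
  simp [PySem.Chars.isdigit]

theorem aInner_spec (l val : List Char) :
    aInner val l = (val ++ l.takeWhile PySem.Chars.isdigit, l.dropWhile PySem.Chars.isdigit) := by
  induction l generalizing val with
  | nil => simp [aInner]
  | cons c rest ih =>
    simp only [aInner, List.takeWhile, List.dropWhile]
    by_cases h : PySem.Chars.isdigit c = true
    · rw [if_pos ((dig_iff c).mpr h), h, ih]
      simp
    · rw [if_neg (fun hp => h ((dig_iff c).mp hp))]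
      simp [h]

theorem bNum_spec (l num : List Char) :
    bNum num l = (num ++ l.takeWhile PySem.Chars.isdigit, l.dropWhile PySem.Chars.isdigit) := by
  induction l generalizing num with
  | nil => simp [bNum]
  | cons c rest ih =>
    simp only [bNum, List.takeWhile, List.dropWhile]
    by_cases h : PySem.Chars.isdigit c = true
    · rw [if_pos h, h, ih]; simp
    · rw [if_neg h]; simp [h]

theorem bTokens_cons_digit (c : Char) (l : List Char) (h : PySem.Chars.isdigit c = true) :
    bTokens (c :: l) = (c :: l.takeWhile PySem.Chars.isdigit) :: bTokens (l.dropWhile PySem.Chars.isdigit) := by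
  rw [bTokens, if_pos h, bNum_spec]
  simp

theorem bTokens_cons_nondigit (c : Char) (l : List Char) (h : PySem.Chars.isdigit c = false) :
    bTokens (c :: l) = [c] :: bTokens l := by
  rw [bTokens, if_neg (by simp [h])]

theorem takeWhile_append_nondigit (xs zs : List Char) (c : Char)
    (h : PySem.Chars.isdigit c = false) :
    (xs ++ c :: zs).takeWhile PySem.Chars.isdigit = xs.takeWhile PySem.Chars.isdigit := by
  induction xs with
  | nil => simp [List.takeWhile, h]
  | cons x xs' ih =>
    simp only [List.cons_append, List.takeWhile]
    cases hx : PySem.Chars.isdigit x <;> simp [hx]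
    exact ih

theorem dropWhile_append_nondigit (xs zs : List Char) (c : Char)
    (h : PySem.Chars.isdigit c = false) :
    (xs ++ c :: zs).dropWhile PySem.Chars.isdigit = xs.dropWhile PySem.Chars.isdigit ++ c :: zs := by
  induction xs with
  | nil => simp [List.dropWhile, h]
  | cons x xs' ih =>
    simp only [List.cons_append, List.dropWhile]
    cases hx : PySem.Chars.isdigit x <;> simp [hx]
    exact ih

-- splitting the token list at a non-digit character
theorem bTokens_split (xs : List Char) (c : Char) (zs : List Char)
    (h : PySem.Chars.isdigit c = false) :
    bTokens (xs ++ c :: zs) = bTokens xs ++ bTokens (c :: zs) := by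
  induction hn : xs.length using Nat.strong_induction_on generalizing xs with
  | _ n ih =>
    cases xs with
    | nil => simp [bTokens]
    | cons x xs' =>
      by_cases hx : PySem.Chars.isdigit x = true
      · rw [List.cons_append, bTokens_cons_digit _ _ hx, bTokens_cons_digit _ _ hx,
          takeWhile_append_nondigit _ _ _ h, dropWhile_append_nondigit _ _ _ h]
        have hlen : (xs'.dropWhile PySem.Chars.isdigit).length < n := by
          have := List.length_dropWhile_le (p := PySem.Chars.isdigit) xs'
          simp at hn; omega
        rw [ih _ hlen _ rfl]
        simp
      · rw [List.cons_append, bTokens_cons_nondigit _ _ (by simpa using hx),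
          bTokens_cons_nondigit _ _ (by simpa using hx)]
        have hlen : xs'.length < n := by simp at hn; omega
        rw [ih _ hlen _ rfl]
        simp

theorem bTokens_all_digits (l : List Char) (hne : l ≠ [])
    (h : ∀ c ∈ l, PySem.Chars.isdigit c = true) : bTokens l = [l] := by
  cases l with
  | nil => exact absurd rfl hne
  | cons x l' =>
    rw [bTokens_cons_digit _ _ (h x (by simp)),
      List.takeWhile_eq_self_iff.mpr (fun c hc => h c (by simp [hc])),
      List.dropWhile_eq_nil_iff.mpr (fun c hc => h c (by simp [hc]))]
    simp [bTokens]

-- main invariant: A's outer loop over the reversed characters produces B's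
-- forward tokens, reversed, appended to the accumulator
theorem aOuter_eq_tokens (rcs : List Char) (ans : List (List Char)) :
    aOuter rcs ans = ans ++ (bTokens rcs.reverse).reverse := by
  induction hn : rcs.length using Nat.strong_induction_on generalizing rcs ans with
  | _ n ih =>
    cases rcs with
    | nil => unfold aOuter; simp [bTokens]
    | cons c0 rcs0 =>
      unfold aOuter
      rw [aInner_spec]
      set d := (c0 :: rcs0).takeWhile PySem.Chars.isdigit with hd
      set r := (c0 :: rcs0).dropWhile PySem.Chars.isdigit with hr
      have hdr : d ++ r = c0 :: rcs0 := List.takeWhile_append_dropWhile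
      have hdall : ∀ c ∈ d, PySem.Chars.isdigit c = true := fun c hc =>
        List.mem_takeWhile_imp hc
      cases hrc : r with
      | nil =>
        -- whole string is digits
        have hdne : d ≠ [] := by
          intro h0; rw [h0, hrc] at hdr; simp at hdr
        show (if d ≠ [] then ans ++ [d.reverse] else ans) =
          ans ++ (bTokens (c0 :: rcs0).reverse).reverse
        rw [if_pos (by simpa using hdne)]
        have hrev : (c0 :: rcs0).reverse = d.reverse := by
          rw [← hdr, hrc]; simp
        rw [hrev, bTokens_all_digits d.reverse (by simpa using hdne)
          (fun c hc => hdall c (by simpa using hc))]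
        simp
      | cons c rest =>
        have hc : PySem.Chars.isdigit c = false := by
          have := List.head_dropWhile_not (p := PySem.Chars.isdigit) (l := c0 :: rcs0)
          rw [← hr, hrc] at this
          simpa using this (by simp)
        have hrev : (c0 :: rcs0).reverse = rest.reverse ++ c :: d.reverse := by
          rw [← hdr, hrc]; simp
        have hlen : rest.length < n := by
          have : r.length ≤ (c0 :: rcs0).length := by
            rw [hr]; exact List.length_dropWhile_le _ _
          rw [hrc] at this; simp at this hn ⊢; omega
        show aOuter rest ((if d ≠ [] then ans ++ [d.reverse] else ans) ++ [[c]]) =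
          ans ++ (bTokens (c0 :: rcs0).reverse).reverse
        rw [ih _ hlen _ _ rfl, hrev, bTokens_split _ _ _ hc,
          bTokens_cons_nondigit _ _ hc]
        by_cases hdne : d = []
        · rw [if_neg (fun h => h hdne), hdne]
          simp [bTokens]
        · rw [if_pos (by simpa using hdne)]
          rw [bTokens_all_digits d.reverse (by simpa using hdne)
            (fun c' hc' => hdall c' (by simpa using hc'))]
          simp

-- ===== VERDICT (by name: the statement is the Claim_ definition above) =====
theorem reverseEqn_spec : Claim_equal_reverseEqn := by
  intro s _
  unfold Spec_reverseEqn reverseEqn reverseEqn_alt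
  rw [aOuter_eq_tokens]
  simp
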